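-- pv_equiv track=rewrite | github.com/pypi-data/pypi-mirror-398 | packages/vtkapi-mcp/vtkapi_mcp-1.4.0-py3-none-any.whl/vtkapi_mcp/core/api_index.py | _build_method_entry
-- ===== SOURCE A (Python) =====
-- from typing import Dict, List, Optional, Any
--
-- def _build_method_entry(method_name: str, buffer: List[str]) -> Optional[Dict[str, Any]]:
--     """Convert buffered text into a method entry"""
--     if not buffer:
--         return None
--
--     signature = ''
--     doc_lines: List[str] = []
--     found_signature = False
--     for line in buffer:
--         stripped = line.strip()
--         if not stripped and not found_signature:
--             continue
--         if not found_signature and stripped: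
--             signature = stripped
--             found_signature = True
--         else:
--             doc_lines.append(line)
--
--     if not signature:
--         return None
--
--     return {
--         'method_name': method_name,
--         'signature': signature,
--         'doc': '\n'.join(doc_lines).strip(),
--         'section': 'Methods defined here'
--     }
-- ===== SOURCE B (Python) =====
-- from typing import Dict, List, Optional, Any
--
-- def _build_method_entry(method_name: str, buffer: List[str]) -> Optional[Dict[str, Any]]:
--     """Convert buffered text into a method entry"""
--     idx = next((i for i, line in enumerate(buffer) if line.strip()), None)
--     if idx is None:
--         return None
--     return {
--         'method_name': method_name,
--         'signature': buffer[idx].strip(),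
--         'doc': '\n'.join(buffer[idx + 1:]).strip(),
--         'section': 'Methods defined here'
--     }
-- ===== Notes on version B (the rewrite author's own statement) =====
-- stated objective: simpler
-- what changed: Replaced the flag-threaded accumulator loop (found_signature flag, doc_lines list built line by line) with a find-first-nonblank-index followed by a slice: signature is that line stripped and doc is the join of the remaining lines.
import Mathlib
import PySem

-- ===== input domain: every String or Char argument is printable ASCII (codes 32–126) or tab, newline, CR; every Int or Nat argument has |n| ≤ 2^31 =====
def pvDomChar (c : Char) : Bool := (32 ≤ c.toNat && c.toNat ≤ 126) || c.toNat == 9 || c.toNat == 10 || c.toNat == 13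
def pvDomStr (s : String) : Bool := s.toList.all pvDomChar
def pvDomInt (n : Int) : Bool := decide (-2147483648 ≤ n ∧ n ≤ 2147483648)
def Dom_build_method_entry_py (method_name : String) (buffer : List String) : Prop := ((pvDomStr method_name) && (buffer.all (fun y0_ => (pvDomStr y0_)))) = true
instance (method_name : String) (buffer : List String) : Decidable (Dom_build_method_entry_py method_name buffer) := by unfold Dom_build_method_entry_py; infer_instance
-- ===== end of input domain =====

-- B replaces A's flag-threaded accumulator loop with find-first-nonblank-then-slice (objective: simpler).

-- ===== PORT A =====
-- loop state: (signature, doc_lines, found_signature)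
def buildMethodEntryStep (st : String × List String × Bool) (line : String) : String × List String × Bool :=
  let stripped := PySem.Str.strip line
  if stripped = "" ∧ st.2.2 = false then st
  else if st.2.2 = false ∧ stripped ≠ "" then (stripped, st.2.1, true)
  else (st.1, st.2.1 ++ [line], st.2.2)

def build_method_entry_py (method_name : String) (buffer : List String) : Option (List (String × String)) :=
  if buffer = [] then none
  else
    let st := buffer.foldl buildMethodEntryStep ("", [], false)
    if st.1 = "" then none
    else some [("method_name", method_name),
               ("signature", st.1),
               ("doc", PySem.Str.strip (PySem.Str.join "\n" st.2.1)),
               ("section", "Methods defined here")]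

-- ===== PORT B =====
def build_method_entry_py_alt (method_name : String) (buffer : List String) : Option (List (String × String)) :=
  match buffer.findIdx? (fun l => PySem.Str.strip l != "") with
  | none => none
  | some i => some [("method_name", method_name),
                    ("signature", PySem.Str.strip (buffer.getD i "")),
                    ("doc", PySem.Str.strip (PySem.Str.join "\n" (buffer.drop (i + 1)))),
                    ("section", "Methods defined here")]

-- ===== PRECONDITION & SPEC =====
def Spec_build_method_entry_py (method_name : String) (buffer : List String) (out : Option (List (String × String))) : Prop := out = build_method_entry_py_alt method_name buffer
instance (method_name : String) (buffer : List String) (out : Option (List (String × String))) : Decidable (Spec_build_method_entry_py method_name buffer out) := by unfold Spec_build_method_entry_py; infer_instance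

-- ===== CLAIM (what is proved, stated in full; the proofs are below) =====
def Claim_equal_build_method_entry_py : Prop := ∀ (method_name : String) (buffer : List String), Dom_build_method_entry_py method_name buffer → Spec_build_method_entry_py method_name buffer (build_method_entry_py method_name buffer)

-- ===== LEMMAS AND PROOFS =====

-- once found_signature is true, the loop only appends each remaining line to doc_lines
theorem foldl_step_found (rest : List String) (sig : String) (acc : List String) :
    rest.foldl buildMethodEntryStep (sig, acc, true) = (sig, acc ++ rest, true) := by
  induction rest generalizing acc with
  | nil => simp
  | cons h t ih =>
    have hstep : buildMethodEntryStep (sig, acc, true) h = (sig, acc ++ [h], true) := by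
      simp [buildMethodEntryStep]
    rw [List.foldl_cons, hstep, ih (acc ++ [h])]
    simp

theorem build_method_entry_eq (method_name : String) (buffer : List String) :
    build_method_entry_py method_name buffer = build_method_entry_py_alt method_name buffer := by
  induction buffer with
  | nil => rfl
  | cons h t ih =>
    by_cases hs : PySem.Str.strip h = ""
    · -- blank leading line: both skip it
      have hstep : buildMethodEntryStep ("", [], false) h = ("", [], false) := by
        simp [buildMethodEntryStep, hs]
      have hA : build_method_entry_py method_name (h :: t) = build_method_entry_py method_name t := by
        unfold build_method_entry_py
        rw [List.foldl_cons, hstep]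
        cases t with
        | nil => simp
        | cons h' t' => simp
      rw [hA, ih]
      unfold build_method_entry_py_alt
      rw [List.findIdx?_cons]
      rw [if_neg (by simp [hs])]
      cases hfi : List.findIdx? (fun l => PySem.Str.strip l != "") t with
      | none => simp
      | some i => simp [List.getD]
    · -- first non-blank line: signature found, rest become doc lines
      have hstep : buildMethodEntryStep ("", [], false) h = (PySem.Str.strip h, [], true) := by
        simp [buildMethodEntryStep, hs]
      simp only [build_method_entry_py, build_method_entry_py_alt, List.foldl_cons, hstep,
        foldl_step_found t (PySem.Str.strip h) [], List.findIdx?_cons]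
      simp [hs, List.getD]

-- ===== VERDICT (by name: the statement is the Claim_ definition above) =====
theorem build_method_entry_py_spec : Claim_equal_build_method_entry_py := by
  intro m buf _
  exact build_method_entry_eq m buf
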